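-- pv_equiv track=rewrite | github.com/juan-acu/pyqvirus | analyze_mission2.py | identify_passes
-- ===== SOURCE A (Python) =====
-- def identify_passes(mask_array, times_array):
--     """Segmenta el array de visibilidad en pasadas individuales."""
--     passes = []
--     in_pass = False
--     pass_start = None
--     for i, is_visible in enumerate(mask_array):
--         if is_visible and not in_pass:
--             in_pass = True
--             pass_start = i
--         elif not is_visible and in_pass:
--             in_pass = False
--             passes.append((pass_start, i-1))
--             pass_start = None
--     if in_pass and pass_start is not None:
--         passes.append((pass_start, len(mask_array)-1))
--     return passes
-- ===== SOURCE B (Python) =====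
-- from itertools import groupby
--
--
-- def identify_passes(mask_array, times_array):
--     """Segmenta el array de visibilidad en pasadas individuales."""
--     runs = [(bool(k), sum(1 for _ in g)) for k, g in groupby(mask_array, key=bool)]
--     passes = []
--     pos = 0
--     for flag, n in runs:
--         if flag:
--             passes.append((pos, pos + n - 1))
--         pos += n
--     return passes
-- ===== Notes on version B (the rewrite author's own statement) =====
-- stated objective: idiomatic
-- what changed: Replaces the in_pass/pass_start state machine with itertools.groupby: run-length-encode the mask into (flag, count) runs, then emit (pos, pos+n-1) for each True run while advancing pos.
import Mathlib
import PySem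

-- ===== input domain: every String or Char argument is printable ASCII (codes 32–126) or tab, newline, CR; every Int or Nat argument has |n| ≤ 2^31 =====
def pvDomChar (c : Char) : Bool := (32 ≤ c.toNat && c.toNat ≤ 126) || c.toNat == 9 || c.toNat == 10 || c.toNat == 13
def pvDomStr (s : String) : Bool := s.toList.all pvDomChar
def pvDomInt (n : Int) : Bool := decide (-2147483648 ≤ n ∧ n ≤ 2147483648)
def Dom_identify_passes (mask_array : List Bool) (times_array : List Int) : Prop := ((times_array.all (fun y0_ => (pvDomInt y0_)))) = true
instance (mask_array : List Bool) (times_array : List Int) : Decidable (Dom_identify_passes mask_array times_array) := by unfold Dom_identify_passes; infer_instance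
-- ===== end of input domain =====

-- B replaces A's in_pass/pass_start state machine with a groupby-style run-length
-- encoding followed by a positional emit pass (idiomatic; same O(n) cost).

-- ===== PORT A =====
-- A's for-loop over enumerate(mask_array): index i and state (passes, in_pass, pass_start).
def pvALoop (st : List (Int × Int) × Bool × Option Int) (i : Int) :
    List Bool → List (Int × Int) × Bool × Option Int
  | [] => st
  | vis :: rest =>
      let st' :=
        if vis && !st.2.1 then (st.1, true, some i)
        else if !vis && st.2.1 then
          -- pass_start is always `some` here in A; `.getD 0` only makes the pair total
          (st.1 ++ [(st.2.2.getD 0, i - 1)], false, none)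
        else st
      pvALoop st' (i + 1) rest

-- A's trailing "if in_pass and pass_start is not None" fixup.
def pvAFin (st : List (Int × Int) × Bool × Option Int) (n : Int) : List (Int × Int) :=
  match st with
  | (passes, in_pass, pass_start) =>
      if in_pass then
        match pass_start with
        | some s => passes ++ [(s, n - 1)]
        | none => passes
      else passes

def identify_passes (mask_array : List Bool) (times_array : List Int) : List (Int × Int) :=
  pvAFin (pvALoop ([], false, none) 0 mask_array) (mask_array.length : Int)

-- ===== PORT B =====
-- groupby(mask_array, key=bool) → run-length encoding as (flag, count) runs.
def pvRleGo (cur : Bool) (cnt : Int) : List Bool → List (Bool × Int)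
  | [] => [(cur, cnt)]
  | y :: ys => if y == cur then pvRleGo cur (cnt + 1) ys else (cur, cnt) :: pvRleGo y 1 ys

def pvRle : List Bool → List (Bool × Int)
  | [] => []
  | x :: xs => pvRleGo x 1 xs

-- the `for flag, n in runs` loop: emit a pair per True run, advance pos by n.
def pvEmit : List (Bool × Int) → Int → List (Int × Int)
  | [], _ => []
  | (b, n) :: rest, pos =>
      if b then (pos, pos + n - 1) :: pvEmit rest (pos + n) else pvEmit rest (pos + n)

def identify_passes_alt (mask_array : List Bool) (times_array : List Int) : List (Int × Int) :=
  pvEmit (pvRle mask_array) 0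

-- ===== PRECONDITION & SPEC =====
def Spec_identify_passes (mask_array : List Bool) (times_array : List Int) (out : List (Int × Int)) : Prop := out = identify_passes_alt mask_array times_array
instance (mask_array : List Bool) (times_array : List Int) (out : List (Int × Int)) : Decidable (Spec_identify_passes mask_array times_array out) := by unfold Spec_identify_passes; infer_instance

-- ===== CLAIM (what is proved, stated in full; the proofs are below) =====
def Claim_equal_identify_passes : Prop := ∀ (mask_array : List Bool) (times_array : List Int), Dom_identify_passes mask_array times_array → Spec_identify_passes mask_array times_array (identify_passes mask_array times_array)

-- ===== LEMMAS AND PROOFS =====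

-- How B's emit behaves when A is mid-pass (pass started at s): close the pass at pos-1
-- unless the next run is visible, in which case the pass extends through it.
def pvEmitC (s : Int) (runs : List (Bool × Int)) (pos : Int) : List (Int × Int) :=
  match runs with
  | (true, n) :: rest => (s, pos + n - 1) :: pvEmit rest (pos + n)
  | _ => (s, pos - 1) :: pvEmit runs pos

theorem pvEmit_rleGo_false (t : List Bool) : ∀ (c pos : Int),
    pvEmit (pvRleGo false c t) pos = pvEmit (pvRle t) (pos + c) := by
  induction t with
  | nil => intro c pos; simp [pvRleGo, pvRle, pvEmit]
  | cons y ys ih =>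
      intro c pos
      cases y with
      | false =>
          simp only [pvRleGo, pvRle, beq_self_eq_true, if_pos]
          rw [ih (c + 1) pos, ih 1 (pos + c)]
          ring_nf
      | true =>
          simp [pvRleGo, pvRle, pvEmit]

theorem pvEmitC_rleGo_false (t : List Bool) : ∀ (c pos s : Int),
    pvEmitC s (pvRleGo false c t) pos = (s, pos - 1) :: pvEmit (pvRleGo false c t) pos := by
  induction t with
  | nil => intro c pos s; simp [pvRleGo, pvEmitC]
  | cons y ys ih =>
      intro c pos s
      cases y with
      | false => simp only [pvRleGo, beq_self_eq_true, if_pos]; exact ih (c + 1) pos s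
      | true => simp [pvRleGo, pvEmitC]

theorem pvEmitC_rleGo_true (t : List Bool) : ∀ (c pos s : Int),
    pvEmitC s (pvRleGo true c t) pos = pvEmitC s (pvRle t) (pos + c) := by
  induction t with
  | nil => intro c pos s; simp [pvRleGo, pvRle, pvEmitC, pvEmit]
  | cons y ys ih =>
      intro c pos s
      cases y with
      | true =>
          simp only [pvRleGo, pvRle, beq_self_eq_true, if_pos]
          rw [ih (c + 1) pos s, ih 1 (pos + c) s]
          ring_nf
      | false =>
          simp only [pvRleGo, pvRle]
          norm_num
          rw [pvEmitC_rleGo_false]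
          simp [pvEmitC]

theorem pvEmit_rleGo_true (t : List Bool) : ∀ (c pos : Int),
    pvEmit (pvRleGo true c t) pos = pvEmitC pos (pvRle t) (pos + c) := by
  induction t with
  | nil => intro c pos; simp [pvRleGo, pvRle, pvEmitC, pvEmit]
  | cons y ys ih =>
      intro c pos
      cases y with
      | true =>
          simp only [pvRleGo, pvRle, beq_self_eq_true, if_pos]
          rw [ih (c + 1) pos, pvEmitC_rleGo_true]
          ring_nf
      | false =>
          simp only [pvRleGo, pvRle]
          norm_num
          rw [pvEmitC_rleGo_false]
          simp [pvEmit]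

-- Main run-structure invariant for A's state machine.
theorem pvMain (xs : List Bool) :
    (∀ (i : Int) (ps : List (Int × Int)),
        pvAFin (pvALoop (ps, false, none) i xs) (i + xs.length) = ps ++ pvEmit (pvRle xs) i) ∧
    (∀ (i s : Int) (ps : List (Int × Int)),
        pvAFin (pvALoop (ps, true, some s) i xs) (i + xs.length) = ps ++ pvEmitC s (pvRle xs) i) := by
  induction xs with
  | nil =>
      constructor
      · intro i ps; simp [pvALoop, pvAFin, pvRle, pvEmit]
      · intro i s ps; simp [pvALoop, pvAFin, pvRle, pvEmitC, pvEmit]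
  | cons x t ih =>
      obtain ⟨ihOut, ihIn⟩ := ih
      have hn : ∀ i : Int, (i + (((t.length : Int)) + 1)) = (i + 1) + (t.length : Int) := by
        intro i; ring
      constructor
      · intro i ps
        cases x with
        | false =>
            simp only [pvALoop]
            norm_num
            rw [hn i, ihOut (i + 1) ps,
              show pvRle (false :: t) = pvRleGo false 1 t from rfl, pvEmit_rleGo_false]
        | true =>
            simp only [pvALoop]
            norm_num
            rw [hn i, ihIn (i + 1) i ps,
              show pvRle (true :: t) = pvRleGo true 1 t from rfl, pvEmit_rleGo_true]
      · intro i s ps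
        cases x with
        | true =>
            simp only [pvALoop]
            norm_num
            rw [hn i, ihIn (i + 1) s ps,
              show pvRle (true :: t) = pvRleGo true 1 t from rfl, pvEmitC_rleGo_true]
        | false =>
            simp only [pvALoop]
            norm_num
            rw [hn i, ihOut (i + 1) (ps ++ [(s, i - 1)]),
              show pvRle (false :: t) = pvRleGo false 1 t from rfl, pvEmitC_rleGo_false,
              pvEmit_rleGo_false]
            simp

-- ===== VERDICT (by name: the statement is the Claim_ definition above) =====
theorem identify_passes_spec : Claim_equal_identify_passes := by
  intro mask times _
  unfold Spec_identify_passes identify_passes identify_passes_alt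
  have := (pvMain mask).1 0 []
  simpa using this
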